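-- pv_equiv track=rewrite | github.com/sap-stockanalyzer/SAP---StockAnalyzerPro | dt_backend/core/policy_engine_dt.py | _lane_symbols
-- ===== SOURCE A (Python) =====
-- from typing import Any, Dict, List, Tuple, Optional
--
-- def _lane_symbols(rolling: Dict[str, Any], symbols: Optional[List[str]], max_symbols: Optional[int]) -> List[str]:
--     """Determine which symbols this call should touch (lane-aware)."""
--     keys = [s for s in rolling.keys() if isinstance(s, str) and not s.startswith("_")]
--     if isinstance(symbols, list) and symbols:
--         wanted = {str(s).strip().upper() for s in symbols if str(s).strip()}
--         keys = [s for s in keys if str(s).upper() in wanted]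
--     keys.sort()
--     if max_symbols is not None:
--         try:
--             keys = keys[: max(0, int(max_symbols))]
--         except Exception:
--             pass
--     return keys
-- ===== SOURCE B (Python) =====
-- def _lane_symbols(rolling, symbols, max_symbols):
--     """Determine which symbols this call should touch (lane-aware).
--
--     Online bounded selection: a single pass over the keys maintains a sorted
--     buffer by ordered insertion, evicting the largest element whenever the
--     buffer exceeds the limit; no sort call and no slicing are needed.
--     """
--     wanted = None
--     if isinstance(symbols, list) and symbols:
--         wanted = {str(s).strip().upper() for s in symbols if str(s).strip()}
--     cap = None if max_symbols is None else max(0, int(max_symbols))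
--     out = []
--     for s in rolling.keys():
--         if not isinstance(s, str) or s.startswith("_"):
--             continue
--         if wanted is not None and s.upper() not in wanted:
--             continue
--         i = 0
--         while i < len(out) and out[i] < s:
--             i += 1
--         out.insert(i, s)
--         if cap is not None and len(out) > cap:
--             out.pop()
--     return out
-- ===== Notes on version B (the rewrite author's own statement) =====
-- stated objective: alternative
-- what changed: A filters the key list, fully sorts it, then slices off the limit; B never calls sort or slice: it makes one online pass over the keys, keeping a bounded sorted buffer by ordered insertion and evicting the largest element whenever the buffer exceeds the limit (online partial selection).
import Mathlib
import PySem

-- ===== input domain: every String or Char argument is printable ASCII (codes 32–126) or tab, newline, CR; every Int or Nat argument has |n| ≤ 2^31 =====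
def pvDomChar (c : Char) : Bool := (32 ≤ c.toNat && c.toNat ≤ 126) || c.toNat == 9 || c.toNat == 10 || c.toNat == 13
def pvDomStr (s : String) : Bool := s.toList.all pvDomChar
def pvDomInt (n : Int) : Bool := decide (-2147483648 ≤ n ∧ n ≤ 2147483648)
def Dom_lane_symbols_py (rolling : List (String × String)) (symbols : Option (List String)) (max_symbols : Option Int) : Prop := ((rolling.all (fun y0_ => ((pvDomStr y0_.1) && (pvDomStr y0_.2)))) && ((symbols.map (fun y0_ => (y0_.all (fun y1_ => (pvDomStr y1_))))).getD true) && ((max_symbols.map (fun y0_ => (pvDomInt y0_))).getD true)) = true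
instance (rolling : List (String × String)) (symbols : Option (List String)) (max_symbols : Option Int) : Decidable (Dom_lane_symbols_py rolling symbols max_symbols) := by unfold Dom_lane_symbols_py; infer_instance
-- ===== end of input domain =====

-- B replaces A's filter/full-sort/slice pipeline by one online pass keeping a bounded sorted
-- buffer via ordered insertion with eviction of the largest (alternative algorithm, no sort call).

-- ===== PORT A =====
def lane_symbols_py (rolling : List (String × String)) (symbols : Option (List String)) (max_symbols : Option Int) : List String :=
  let keys := ((PySem.Dict.ofList rolling).keys).filter (fun s => !(PySem.Str.startswith s "_"))
  let keys :=
    match symbols with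
    | some syms =>
        if syms.isEmpty then keys
        else
          let wanted : PySem.Set String :=
            PySem.Set.ofList ((syms.filter (fun s => !(PySem.Str.strip s == ""))).map
              (fun s => PySem.Str.upper (PySem.Str.strip s)))
          keys.filter (fun s => PySem.Set.contains wanted (PySem.Str.upper s))
    | none => keys
  let keys := PySem.List.sorted keys (fun s => s) false
  match max_symbols with
  | none => keys
  | some m => PySem.List.slice keys none (some (max 0 m))

-- ===== PORT B =====
-- out.insert(i, s) after the linear scan 'while i < len(out) and out[i] < s': ordered insertion
def ordIns (s : String) : List String → List String
  | [] => [s]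
  | x :: xs => if x < s then x :: ordIns s xs else s :: x :: xs

-- B's single pass: skip filtered-out keys, insert the rest in order, pop the last when over the cap
def laneIns (wanted : Option (PySem.Set String)) (cap : Option Int) (out : List String) :
    List String → List String
  | [] => out
  | s :: rest =>
    if PySem.Str.startswith s "_" then laneIns wanted cap out rest
    else if (match wanted with
             | some w => !(PySem.Set.contains w (PySem.Str.upper s))
             | none => false) then laneIns wanted cap out rest
    else
      laneIns wanted cap
        (match cap with
         | some n => if n < ((ordIns s out).length : Int) then (ordIns s out).dropLast
                     else ordIns s out
         | none => ordIns s out) rest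

def lane_symbols_py_alt (rolling : List (String × String)) (symbols : Option (List String)) (max_symbols : Option Int) : List String :=
  let wanted : Option (PySem.Set String) :=
    match symbols with
    | some syms =>
        if syms.isEmpty then none
        else some (PySem.Set.ofList ((syms.filter (fun s => !(PySem.Str.strip s == ""))).map
          (fun s => PySem.Str.upper (PySem.Str.strip s))))
    | none => none
  let cap : Option Int := max_symbols.map (fun m => max 0 m)
  laneIns wanted cap [] ((PySem.Dict.ofList rolling).keys)

-- ===== PRECONDITION & SPEC =====
def Spec_lane_symbols_py (rolling : List (String × String)) (symbols : Option (List String)) (max_symbols : Option Int) (out : List String) : Prop := out = lane_symbols_py_alt rolling symbols max_symbols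
instance (rolling : List (String × String)) (symbols : Option (List String)) (max_symbols : Option Int) (out : List String) : Decidable (Spec_lane_symbols_py rolling symbols max_symbols out) := by unfold Spec_lane_symbols_py; infer_instance

-- ===== CLAIM (what is proved, stated in full; the proofs are below) =====
def Claim_equal_lane_symbols_py : Prop := ∀ (rolling : List (String × String)) (symbols : Option (List String)) (max_symbols : Option Int), Dom_lane_symbols_py rolling symbols max_symbols → Spec_lane_symbols_py rolling symbols max_symbols (lane_symbols_py rolling symbols max_symbols)

-- ===== LEMMAS AND PROOFS =====

-- the predicate both programs effectively filter with
def passB (wanted : Option (PySem.Set String)) (s : String) : Bool :=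
  if PySem.Str.startswith s "_" then false
  else match wanted with
       | some w => PySem.Set.contains w (PySem.Str.upper s)
       | none => true

lemma ordIns_perm (s : String) (l : List String) : (ordIns s l).Perm (s :: l) := by
  induction l with
  | nil => simp [ordIns]
  | cons x xs ih =>
    by_cases h : x < s
    · simpa [ordIns, h] using ((ih.cons x).trans (List.Perm.swap s x xs))
    · simp [ordIns, h]

lemma ordIns_length (s : String) (l : List String) : (ordIns s l).length = l.length + 1 := by
  simpa using (ordIns_perm s l).length_eq

lemma ordIns_pairwise (s : String) (l : List String) (hp : l.Pairwise (· < ·)) (hs : s ∉ l) :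
    (ordIns s l).Pairwise (· < ·) := by
  induction l with
  | nil => simp [ordIns]
  | cons x xs ih =>
    rcases List.pairwise_cons.mp hp with ⟨hx, hxs⟩
    have hsx : s ∉ xs := fun h => hs (List.mem_cons_of_mem _ h)
    by_cases h : x < s
    · rw [show ordIns s (x :: xs) = x :: ordIns s xs from by simp [ordIns, h]]
      refine List.pairwise_cons.mpr ⟨?_, ih hxs hsx⟩
      intro y hy
      rcases List.mem_cons.mp ((ordIns_perm s xs).mem_iff.mp hy) with h1 | h1
      · exact h1 ▸ h
      · exact hx y h1
    · rw [show ordIns s (x :: xs) = s :: x :: xs from by simp [ordIns, h]]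
      have hne : s ≠ x := fun h' => hs (h' ▸ List.mem_cons_self)
      have hsx' : s < x := lt_of_le_of_ne (not_lt.mp h) hne
      refine List.pairwise_cons.mpr ⟨?_, hp⟩
      intro y hy
      rcases List.mem_cons.mp hy with h1 | h1
      · exact h1 ▸ hsx'
      · exact hsx'.trans (hx y h1)

lemma take_ordIns_take (s : String) (L : List String) :
    ∀ n : Nat, ((ordIns s (L.take n)).take n) = (ordIns s L).take n := by
  induction L with
  | nil => intro n; simp
  | cons x xs ih =>
    intro n
    cases n with
    | zero => simp
    | succ k =>
      by_cases h : x < s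
      · simp [ordIns, h, ih k]
      · rw [List.take_succ_cons,
          show ordIns s (x :: List.take k xs) = s :: x :: List.take k xs from by simp [ordIns, h],
          show ordIns s (x :: xs) = s :: x :: xs from by simp [ordIns, h],
          List.take_succ_cons, List.take_succ_cons,
          show (x :: List.take k xs) = List.take (k+1) (x :: xs) from by simp,
          List.take_take]
        simp

lemma ordIns_trunc (s : String) (L : List String) (n : Nat) :
    (if n < (ordIns s (L.take n)).length then (ordIns s (L.take n)).dropLast
     else ordIns s (L.take n)) = (ordIns s L).take n := by
  by_cases hL : n ≤ L.length
  · have hlen : (ordIns s (L.take n)).length = n + 1 := by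
      rw [ordIns_length]; simp [Nat.min_eq_left hL]
    rw [if_pos (by omega), List.dropLast_eq_take, hlen]
    simpa using take_ordIns_take s L n
  · have htake : L.take n = L := List.take_of_length_le (by omega)
    have hlen : (ordIns s (L.take n)).length = L.length + 1 := by rw [htake, ordIns_length]
    rw [if_neg (by omega), htake,
      List.take_of_length_le (by rw [ordIns_length]; omega)]

lemma sorted_pairwise_lt (F : List String) (h : F.Nodup) :
    (PySem.List.sorted F (fun s => s) false).Pairwise (· < ·) := by
  have h1 := PySem.List.sorted_pairwise (xs := F) (key := fun s => s)
  have h2 : (PySem.List.sorted F (fun s => s) false).Nodup :=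
    ((PySem.List.sorted_perm F (fun s => s) false).nodup_iff).mpr h
  exact (h1.and h2).imp (fun hab => lt_of_le_of_ne hab.1 hab.2)

lemma ordIns_sorted_eq (F : List String) (s : String) (hF : F.Nodup) (hs : s ∉ F) :
    ordIns s (PySem.List.sorted F (fun t => t) false)
      = PySem.List.sorted (F ++ [s]) (fun t => t) false := by
  symm
  apply PySem.List.sorted_eq_of_perm_of_pairwise_lt
  · exact ((ordIns_perm s _).trans
      (((PySem.List.sorted_perm F (fun t => t) false).cons s).trans
        (List.perm_append_singleton s F).symm))
  · exact ordIns_pairwise s _ (sorted_pairwise_lt F hF)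
      (fun h => hs ((PySem.List.mem_sorted _ _ _ _).mp h))

-- the invariant for B's pass, uncapped: the buffer is the sorted filtered prefix
lemma laneIns_none (w : Option (PySem.Set String)) :
    ∀ (l F : List String), (F ++ l.filter (passB w)).Nodup →
      laneIns w none (PySem.List.sorted F (fun s => s) false) l
        = PySem.List.sorted (F ++ l.filter (passB w)) (fun s => s) false := by
  intro l
  induction l with
  | nil => intro F h; simp [laneIns]
  | cons s rest ih =>
    intro F h
    by_cases h1 : PySem.Chars.startswith s.toList ['_'] = true
    · have hf : passB w s = false := by simp [passB, h1]
      simpa [laneIns, h1, hf] using ih F (by simpa [hf] using h)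
    · have hstep : ∀ (hp : passB w s = true),
          laneIns w none (ordIns s (PySem.List.sorted F (fun t => t) false)) rest
            = PySem.List.sorted (F ++ (s :: rest).filter (passB w)) (fun t => t) false := by
        intro hp
        have hnod : (F ++ s :: rest.filter (passB w)).Nodup := by simpa [hp] using h
        rcases List.nodup_append.mp hnod with ⟨hFn, hcons, hdisj⟩
        have hsF : s ∉ F := fun hmem => hdisj s hmem s List.mem_cons_self rfl
        rw [ordIns_sorted_eq F s hFn hsF, ih (F ++ [s]) (by simpa [hp] using hnod)]
        simp [hp]
      cases w with
      | none =>
        have hp : passB none s = true := by simp [passB, h1]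
        simpa [laneIns, h1] using hstep hp
      | some ws =>
        by_cases h2 : PySem.Str.upper s ∈ ws
        · have hp : passB (some ws) s = true := by simp [passB, h1, h2]
          simpa [laneIns, h1, h2] using hstep hp
        · have hf : passB (some ws) s = false := by simp [passB, h1, h2]
          simpa [laneIns, h1, h2, hf] using ih F (by simpa [hf] using h)

-- the invariant for B's pass, capped at n ≥ 0: the buffer is the sorted filtered prefix truncated
lemma laneIns_some (w : Option (PySem.Set String)) (n : Int) (hn : 0 ≤ n) :
    ∀ (l F : List String), (F ++ l.filter (passB w)).Nodup →
      laneIns w (some n) ((PySem.List.sorted F (fun s => s) false).take n.toNat) l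
        = (PySem.List.sorted (F ++ l.filter (passB w)) (fun s => s) false).take n.toNat := by
  intro l
  induction l with
  | nil => intro F h; simp [laneIns]
  | cons s rest ih =>
    intro F h
    by_cases h1 : PySem.Chars.startswith s.toList ['_'] = true
    · have hf : passB w s = false := by simp [passB, h1]
      simpa [laneIns, h1, hf] using ih F (by simpa [hf] using h)
    · have hstep : ∀ (hp : passB w s = true),
          laneIns w (some n)
            (if n < ((ordIns s ((PySem.List.sorted F (fun t => t) false).take n.toNat)).length : Int)
             then (ordIns s ((PySem.List.sorted F (fun t => t) false).take n.toNat)).dropLast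
             else ordIns s ((PySem.List.sorted F (fun t => t) false).take n.toNat)) rest
            = (PySem.List.sorted (F ++ (s :: rest).filter (passB w)) (fun t => t) false).take n.toNat := by
        intro hp
        have hnod : (F ++ s :: rest.filter (passB w)).Nodup := by simpa [hp] using h
        rcases List.nodup_append.mp hnod with ⟨hFn, hcons, hdisj⟩
        have hsF : s ∉ F := fun hmem => hdisj s hmem s List.mem_cons_self rfl
        have hcond : (n < ((ordIns s ((PySem.List.sorted F (fun t => t) false).take n.toNat)).length : Int))
            ↔ n.toNat < (ordIns s ((PySem.List.sorted F (fun t => t) false).take n.toNat)).length := by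
          omega
        rw [if_congr hcond rfl rfl, ordIns_trunc s _ n.toNat,
          ordIns_sorted_eq F s hFn hsF, ih (F ++ [s]) (by simpa [hp] using hnod)]
        simp [hp]
      cases w with
      | none =>
        have hp : passB none s = true := by simp [passB, h1]
        simpa [laneIns, h1] using hstep hp
      | some ws =>
        by_cases h2 : PySem.Str.upper s ∈ ws
        · have hp : passB (some ws) s = true := by simp [passB, h1, h2]
          simpa [laneIns, h1, h2] using hstep hp
        · have hf : passB (some ws) s = false := by simp [passB, h1, h2]
          simpa [laneIns, h1, h2, hf] using ih F (by simpa [hf] using h)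

lemma filter_passB_some (keys0 : List String) (ws : PySem.Set String) :
    (keys0.filter (fun s => !(PySem.Str.startswith s "_"))).filter
        (fun s => PySem.Set.contains ws (PySem.Str.upper s))
      = keys0.filter (passB (some ws)) := by
  rw [List.filter_filter]
  apply List.filter_congr
  intro a _
  by_cases h : PySem.Chars.startswith a.toList ['_'] = true <;>
    by_cases h2 : PySem.Str.upper a ∈ ws <;> simp [passB, h, h2]

lemma filter_passB_none (keys0 : List String) :
    keys0.filter (fun s => !(PySem.Str.startswith s "_")) = keys0.filter (passB none) := by
  apply List.filter_congr
  intro a _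
  by_cases h : PySem.Chars.startswith a.toList ['_'] = true <;> simp [passB, h]

-- B's whole pass equals A's pipeline, for any wanted set and limit
lemma bridge (keys0 : List String) (hnd : keys0.Nodup) (w : Option (PySem.Set String)) (mx : Option Int) :
    laneIns w (mx.map (fun m => max 0 m)) [] keys0
      = (match mx with
         | none => PySem.List.sorted (keys0.filter (passB w)) (fun s => s) false
         | some m => PySem.List.slice (PySem.List.sorted (keys0.filter (passB w)) (fun s => s) false)
             none (some (max 0 m))) := by
  have hnodF : ([] ++ keys0.filter (passB w)).Nodup := by simpa using hnd.filter _
  cases mx with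
  | none =>
    have := laneIns_none w keys0 [] hnodF
    simpa using this
  | some m =>
    have hnn : (0:Int) ≤ max 0 m := le_max_left 0 m
    have := laneIns_some w (max 0 m) hnn keys0 [] hnodF
    simp only [Option.map_some]
    rw [PySem.List.slice_to _ hnn]
    simpa [PySem.List.sorted] using this

-- ===== VERDICT (by name: the statement is the Claim_ definition above) =====
theorem lane_symbols_py_spec : Claim_equal_lane_symbols_py := by
  intro rolling symbols max_symbols _
  show lane_symbols_py rolling symbols max_symbols = lane_symbols_py_alt rolling symbols max_symbols
  unfold lane_symbols_py lane_symbols_py_alt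
  have hnd : ((PySem.Dict.ofList rolling).keys).Nodup := PySem.Dict.nodup_keys_ofList rolling
  cases symbols with
  | none =>
    simp only []
    rw [filter_passB_none, ← bridge _ hnd none max_symbols]
  | some syms =>
    by_cases he : syms.isEmpty
    · simp only [if_pos he]
      rw [filter_passB_none, ← bridge _ hnd none max_symbols]
    · simp only [if_neg he]
      rw [filter_passB_some, ← bridge _ hnd (some _) max_symbols]
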